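-- pv_equiv track=rewrite | github.com/JissuPark/Algorithm | BOJ/5525.py | ioioi
-- ===== SOURCE A (Python) =====
-- def ioioi(n, m, s):
--     pn = 0
--     cnt = 0
--     i = 1
--     while i < m - 1:
--         if s[i - 1] == 'I' and s[i] == 'O' and s[i + 1] == 'I':
--             pn += 1
--             if pn == n:
--                 cnt += 1
--                 pn -= 1
--             i += 2
--         else:
--             pn = 0
--             i += 1
--     return cnt
-- ===== SOURCE B (Python) =====
-- def ioioi(n, m, s):
--     # Pattern-matching reformulation: the level-n pattern is the explicit
--     # string P = "I" + "OI"*n, and the answer is the number of (overlapping)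
--     # occurrences of P in s[:m].  No chain/run state at all.
--     if n < 1 or m < 2 * n + 1:
--         return 0
--     pat = "I" + "OI" * n
--     t = s[:m]
--     return sum(1 for p in range(len(t) - 2 * n) if t[p:p + 2 * n + 1] == pat)
-- ===== Notes on version B (the rewrite author's own statement) =====
-- stated objective: alternative
-- what changed: Replaces A's stateful stride-2 scan (pn counter bouncing at n) with explicit pattern matching: build the level-n pattern P = 'I' + 'OI'*n and count its overlapping occurrences in s[:m] by comparing a slice of length 2n+1 at every start position; no chain state at all.
-- outside the precondition, e.g. on ioioi(1, 4, 'IOI'): A returns 1, B returns 1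
import Mathlib
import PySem

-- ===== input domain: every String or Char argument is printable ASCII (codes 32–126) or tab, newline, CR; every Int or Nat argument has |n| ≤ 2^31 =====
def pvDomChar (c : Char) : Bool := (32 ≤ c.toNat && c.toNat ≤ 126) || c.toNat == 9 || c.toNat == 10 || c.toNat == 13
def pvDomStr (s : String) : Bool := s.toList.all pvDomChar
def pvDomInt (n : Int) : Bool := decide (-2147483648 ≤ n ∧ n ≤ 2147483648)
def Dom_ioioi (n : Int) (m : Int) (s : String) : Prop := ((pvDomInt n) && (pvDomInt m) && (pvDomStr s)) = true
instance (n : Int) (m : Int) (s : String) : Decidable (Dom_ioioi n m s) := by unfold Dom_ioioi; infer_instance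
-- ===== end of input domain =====

-- B drops A's stateful stride-2 scan and instead counts overlapping occurrences of the
-- explicit pattern "I"+"OI"*n in s[:m]; same return value, different algorithm, no speed claim.

-- ===== PORT A =====
-- while i < m - 1: test s[i-1],s[i],s[i+1]; stateful pn that resets to n-1 when it hits n
-- fuel is only a totality guard: (m-2).toNat bounds the number of iterations, and the
-- loop re-checks i < m - 1 each step exactly as the Python while does
def ioioiLoop (n : Int) (m : Int) (cs : List Char) (fuel : Nat) (i : Int) (pn : Int) (cnt : Int) : Int :=
  match fuel with
  | 0 => cnt
  | fuel + 1 =>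
    if i < m - 1 then
      if PySem.List.pyGet? cs (i - 1) == some 'I' &&
         PySem.List.pyGet? cs i == some 'O' &&
         PySem.List.pyGet? cs (i + 1) == some 'I' then
        if pn + 1 == n then ioioiLoop n m cs fuel (i + 2) (pn + 1 - 1) (cnt + 1)
        else ioioiLoop n m cs fuel (i + 2) (pn + 1) cnt
      else ioioiLoop n m cs fuel (i + 1) 0 cnt
    else cnt

def ioioi (n : Int) (m : Int) (s : String) : Int :=
  ioioiLoop n m s.toList (m - 2).toNat 1 0 0

-- ===== PORT B =====
-- build pat = "I" + "OI"*n, take t = s[:m], count start positions p with t[p:p+2n+1] == pat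
def ioioi_alt (n : Int) (m : Int) (s : String) : Int :=
  if n < 1 || m < 2 * n + 1 then 0
  else
    let pat : List Char := 'I' :: (List.replicate n.toNat ('O' :: 'I' :: [])).flatten
    let t : List Char := PySem.List.slice s.toList none (some m)
    (PySem.List.pyRange 0 ((t.length : Int) - 2 * n) 1).foldl
      (fun cnt p =>
        if PySem.List.slice t (some p) (some (p + 2 * n + 1)) == pat then cnt + 1 else cnt) 0

-- ===== PRECONDITION & SPEC =====
-- Pre_ excludes m > max(len(s), 2): there A's direct indexing s[i-1..i+1] can run past the
-- end of s and raise IndexError (when A happens to return there because the stride-2 walk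
-- exits before touching an out-of-range index, that value is an accident of the walk).
def Pre_ioioi (n : Int) (m : Int) (s : String) : Prop :=
  m ≤ PySem.Str.len s ∨ m ≤ 2
instance (n : Int) (m : Int) (s : String) : Decidable (Pre_ioioi n m s) := by
  unfold Pre_ioioi; infer_instance

def pvWitness_ioioi : Int × Int × String := (1, 3, "IOI")

def Spec_ioioi (n : Int) (m : Int) (s : String) (out : Int) : Prop := out = ioioi_alt n m s
instance (n : Int) (m : Int) (s : String) (out : Int) : Decidable (Spec_ioioi n m s out) := by
  unfold Spec_ioioi; infer_instance

-- ===== CLAIM (what is proved, stated in full; the proofs are below) =====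
def Claim_equal_ioioi : Prop := ∀ (n : Int) (m : Int) (s : String), Dom_ioioi n m s → Pre_ioioi n m s → Spec_ioioi n m s (ioioi n m s)

-- ===== LEMMAS AND PROOFS =====

-- the guard A tests at index q (proof layer; definitionally A's loop condition)
def Tb (cs : List Char) (q : Int) : Bool :=
  PySem.List.pyGet? cs (q - 1) == some 'I' &&
  PySem.List.pyGet? cs q == some 'O' &&
  PySem.List.pyGet? cs (q + 1) == some 'I'

-- B's per-position test (proof layer; definitionally the λ-body of B's foldl)
def occB (n : Int) (m : Int) (cs : List Char) (p : Int) : Bool :=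
  PySem.List.slice (PySem.List.slice cs none (some m)) (some p) (some (p + 2 * n + 1)) ==
    ('I' :: (List.replicate n.toNat ('O' :: 'I' :: [])).flatten)

-- number of p in [a, m-2n) with occB p (B's count from position a on)
def cntFrom (n : Int) (m : Int) (cs : List Char) (a : Int) : Int :=
  if _h : a < m - 2 * n then (if occB n m cs a then 1 else 0) + cntFrom n m cs (a + 1) else 0
termination_by (m - 2 * n - a).toNat
decreasing_by all_goals omega

-- two overlapping triples cannot both match
lemma Tb_adj (cs : List Char) (q : Int) (h1 : Tb cs q = true) (h2 : Tb cs (q + 1) = true) :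
    False := by
  simp only [Tb, Bool.and_eq_true, beq_iff_eq] at h1 h2
  have e1 : PySem.List.pyGet? cs (q + 1) = some 'I' := h1.2
  have e2 : PySem.List.pyGet? cs (q + 1) = some 'O' := h2.1.2
  have := e1.symm.trans e2
  simp at this

-- with n ≤ 0 the branch 'pn + 1 == n' never fires (pn stays ≥ 0), so cnt is returned unchanged
lemma ioioiLoop_nonpos (n m : Int) (cs : List Char) (hn : n ≤ 0) :
    ∀ (fuel : Nat) (i pn cnt : Int), 0 ≤ pn →
      ioioiLoop n m cs fuel i pn cnt = cnt := by
  intro fuel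
  induction fuel with
  | zero => intro i pn cnt hpn; rfl
  | succ f ih =>
    intro i pn cnt hpn
    show (if i < m - 1 then _ else cnt) = cnt
    by_cases hi : i < m - 1
    · rw [if_pos hi]
      split
      · split
        · next hth => exfalso; simp only [beq_iff_eq] at hth; omega
        · exact ih (i + 2) (pn + 1) cnt (by omega)
      · exact ih (i + 1) 0 cnt (by omega)
    · rw [if_neg hi]

-- the pattern as a list of chars, and its unfolding
def patL (N : Nat) : List Char := 'I' :: (List.replicate N ('O' :: 'I' :: [])).flatten

lemma patL_succ (N : Nat) : patL (N + 1) = 'I' :: 'O' :: patL N := by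
  simp [patL, List.replicate_succ]

-- triple match at Nat start index q (s[q:q+3] == "IOI")
def TbN (u : List Char) (q : Nat) : Prop :=
  u[q]? = some 'I' ∧ u[q + 1]? = some 'O' ∧ u[q + 2]? = some 'I'

lemma Tb_of_nat (u : List Char) (q : Nat) :
    Tb u ((q : Int) + 1) = true ↔ TbN u q := by
  have c1 : (q : Int) + 1 - 1 = ((q : Nat) : Int) := by omega
  have c2 : (q : Int) + 1 = ((q + 1 : Nat) : Int) := by push_cast; ring
  have c3 : (q : Int) + 1 + 1 = ((q + 2 : Nat) : Int) := by push_cast; ring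
  rw [Tb, c1, c3, c2]
  simp only [PySem.List.pyGet?_natCast, Bool.and_eq_true, beq_iff_eq, TbN]
  tauto

-- slice = pattern iff leading 'I' plus a chain of N triples every 2 positions
lemma match_iff (u : List Char) :
    ∀ (N p : Nat), p + (2 * N + 1) ≤ u.length →
      ((u.drop p).take (2 * N + 1) = patL N ↔
        (u[p]? = some 'I' ∧ ∀ j, j < N → TbN u (p + 2 * j))) := by
  intro N
  induction N with
  | zero =>
    intro p hp
    have hplen : p < u.length := by omega
    rw [List.drop_eq_getElem_cons hplen,
        show 2 * 0 + 1 = 0 + 1 from rfl, List.take_succ_cons]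
    simp [patL, List.getElem?_eq_getElem hplen]
  | succ N ih =>
    intro p hp
    have h1 : p < u.length := by omega
    have h2 : p + 1 < u.length := by omega
    have e3 : 2 * (N + 1) + 1 = (2 * N + 1) + 1 + 1 := by omega
    rw [e3, List.drop_eq_getElem_cons h1, List.drop_eq_getElem_cons h2,
        List.take_succ_cons, List.take_succ_cons, patL_succ]
    have ih2 := ih (p + 2) (by omega)
    constructor
    · intro h
      have hinj := (List.cons.injEq _ _ _ _).mp h
      have hI : u[p] = 'I' := hinj.1
      have hinj2 := (List.cons.injEq _ _ _ _).mp hinj.2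
      have hO : u[p + 1] = 'O' := hinj2.1
      have hdrop : (u.drop (p + 2)).take (2 * N + 1) = patL N := hinj2.2
      obtain ⟨hI2, hchain⟩ := ih2.mp hdrop
      refine ⟨by simp [List.getElem?_eq_getElem h1, hI], ?_⟩
      intro j hj
      cases j with
      | zero =>
        refine ⟨by simp [List.getElem?_eq_getElem h1, hI],
                by simp [List.getElem?_eq_getElem h2, hO], ?_⟩
        simpa using hI2
      | succ j' =>
        have := hchain j' (by omega)
        have e : p + 2 + 2 * j' = p + 2 * (j' + 1) := by ring
        rwa [e] at this
    · rintro ⟨hI, hchain⟩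
      have t0 := hchain 0 (by omega)
      obtain ⟨tI, tO, tI2⟩ := t0
      have hIv : u[p] = 'I' := by
        rw [List.getElem?_eq_getElem h1] at hI; injection hI
      have hOv : u[p + 1] = 'O' := by
        rw [List.getElem?_eq_getElem h2] at tO; injection tO
      have hrest : (u.drop (p + 2)).take (2 * N + 1) = patL N := by
        apply ih2.mpr
        refine ⟨by simpa using tI2, ?_⟩
        intro j hj
        have := hchain (j + 1) (by omega)
        have e : p + 2 * (j + 1) = p + 2 + 2 * j := by ring
        rwa [e] at this
      rw [hIv, hOv, hrest]

-- occB in terms of A's triple tests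
lemma occB_iff (n m : Int) (cs : List Char) (p : Int) (hn : 1 ≤ n)
    (hm : m ≤ (cs.length : Int)) (hp : 0 ≤ p) (hb : p + 2 * n + 1 ≤ m) :
    occB n m cs p = true ↔ ∀ j : Int, 0 ≤ j → j < n → Tb cs (p + 1 + 2 * j) = true := by
  obtain ⟨P, rfl⟩ : ∃ P : Nat, p = (P : Int) := ⟨p.toNat, by omega⟩
  obtain ⟨M, rfl⟩ : ∃ M : Nat, m = (M : Int) := ⟨m.toNat, by omega⟩
  obtain ⟨N, rfl⟩ : ∃ N : Nat, n = (N : Int) := ⟨n.toNat, by omega⟩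
  have hN : 1 ≤ N := by exact_mod_cast hn
  have hM : M ≤ cs.length := by exact_mod_cast hm
  have hPM : P + (2 * N + 1) ≤ M := by exact_mod_cast hb
  rw [occB]
  have cb : (P : Int) + 2 * (N : Int) + 1 = ((P + (2 * N + 1) : Nat) : Int) := by
    push_cast; ring
  rw [cb, PySem.List.slice_to_natCast, PySem.List.slice_natCast]
  have e1 : (cs.take M).drop P = (cs.drop P).take (M - P) := List.drop_take
  have e2 : P + (2 * N + 1) - P = 2 * N + 1 := by omega
  rw [e1, e2, List.take_take, show min (2 * N + 1) (M - P) = 2 * N + 1 by omega]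
  have hpat : ('I' :: (List.replicate ((N : Int)).toNat ('O' :: 'I' :: [])).flatten) = patL N := by
    simp [patL]
  rw [hpat, beq_iff_eq, match_iff cs N P (by omega)]
  constructor
  · rintro ⟨_, hchain⟩ j hj0 hjn
    obtain ⟨J, rfl⟩ : ∃ J : Nat, j = (J : Int) := ⟨j.toNat, by omega⟩
    have hJ : J < N := by exact_mod_cast hjn
    have := (Tb_of_nat cs (P + 2 * J)).mpr (hchain J hJ)
    have e : ((P + 2 * J : Nat) : Int) + 1 = (P : Int) + 1 + 2 * (J : Int) := by
      push_cast; ring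
    rwa [e] at this
  · intro hall
    have chain : ∀ j, j < N → TbN cs (P + 2 * j) := by
      intro j hj
      have := hall (j : Int) (by positivity) (by exact_mod_cast hj)
      have e : (P : Int) + 1 + 2 * (j : Int) = ((P + 2 * j : Nat) : Int) + 1 := by
        push_cast; ring
      rw [e] at this
      exact (Tb_of_nat cs (P + 2 * j)).mp this
    refine ⟨?_, chain⟩
    exact (chain 0 (by omega)).1

lemma cnt_zero (n m : Int) (cs : List Char) (a : Int) (h : m - 2 * n ≤ a) :
    cntFrom n m cs a = 0 := by
  rw [cntFrom]
  have : ¬ a < m - 2 * n := by omega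
  simp [this]

lemma cnt_peel (n m : Int) (cs : List Char) (a : Int) :
    cntFrom n m cs a =
      (if a < m - 2 * n ∧ occB n m cs a = true then 1 else 0) + cntFrom n m cs (a + 1) := by
  by_cases h : a < m - 2 * n
  · rw [cntFrom, dif_pos h]
    by_cases ho : occB n m cs a = true
    · rw [if_pos ho, if_pos ⟨h, ho⟩]
    · rw [if_neg (by simpa using ho), if_neg (fun hc => ho hc.2)]
  · rw [cnt_zero n m cs a (by omega), cnt_zero n m cs (a + 1) (by omega),
        if_neg (fun hc => h hc.1)]
    omega

-- window lemma: a maximal chain of K triples ending just before i contributes max 0 (K-n+1)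
lemma window (n m : Int) (cs : List Char) (hn : 1 ≤ n) (hm : m ≤ (cs.length : Int)) :
    ∀ (K : Nat) (i : Int), 0 ≤ i - 1 - 2 * (K : Int) → i ≤ m →
      (∀ j : Int, 1 ≤ j → j ≤ (K : Int) → Tb cs (i - 2 * j) = true) →
      (Tb cs i = false ∨ m - 1 ≤ i) →
      cntFrom n m cs (i - 1 - 2 * (K : Int)) = max 0 ((K : Int) - n + 1) + cntFrom n m cs i := by
  intro K
  induction K with
  | zero =>
    intro i h0 him _ hstop
    have hmax : max (0 : Int) (((0 : Nat) : Int) - n + 1) = 0 := by push_cast; omega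
    rw [hmax]
    have e : i - 1 - 2 * ((0 : Nat) : Int) = i - 1 := by simp
    rw [e, cnt_peel]
    have hz : ¬ (i - 1 < m - 2 * n ∧ occB n m cs (i - 1) = true) := by
      rintro ⟨hr, ho⟩
      have hTi := (occB_iff n m cs (i - 1) hn hm (by omega) (by omega)).mp ho 0
        (by omega) (by omega)
      rw [show i - 1 + 1 + 2 * 0 = i by ring] at hTi
      rcases hstop with hF | hB
      · rw [hF] at hTi; exact absurd hTi (by simp)
      · omega
    rw [if_neg hz, show i - 1 + 1 = i by ring]
  | succ K ih =>
    intro i h0 him hchain hstop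
    have hK0 : (0 : Int) ≤ i - 1 - 2 * (K : Int) := by push_cast at h0 ⊢; omega
    have ihK := ih i hK0 him (fun j hj1 hj2 => hchain j hj1 (by push_cast; omega)) hstop
    have ea : i - 1 - 2 * ((K + 1 : Nat) : Int) = i - 3 - 2 * (K : Int) := by push_cast; ring
    rw [ea, cnt_peel, cnt_peel,
        show i - 3 - 2 * (K : Int) + 1 = i - 2 - 2 * (K : Int) by ring,
        show i - 2 - 2 * (K : Int) + 1 = i - 1 - 2 * (K : Int) by ring, ihK]
    -- middle term is 0: a start at i-2-2K would need a triple adjacent to the chain's lowest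
    have hmid : ¬ (i - 2 - 2 * (K : Int) < m - 2 * n ∧ occB n m cs (i - 2 - 2 * (K : Int)) = true) := by
      rintro ⟨hr, ho⟩
      have hT := (occB_iff n m cs (i - 2 - 2 * (K : Int)) hn hm (by push_cast at h0; omega)
        (by omega)).mp ho 0 (by omega) (by omega)
      rw [show i - 2 - 2 * (K : Int) + 1 + 2 * 0 = i - 2 * ((K : Int) + 1) + 1 by ring] at hT
      have hlow := hchain ((K : Int) + 1) (by omega) (by push_cast; omega)
      exact Tb_adj cs (i - 2 * ((K : Int) + 1)) hlow hT
    rw [if_neg hmid]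
    by_cases hcase : n ≤ (K : Int) + 1
    · -- full occurrence starting at the chain bottom
      have hfirst : (i - 3 - 2 * (K : Int)) < m - 2 * n ∧
          occB n m cs (i - 3 - 2 * (K : Int)) = true := by
        constructor
        · omega
        · apply (occB_iff n m cs (i - 3 - 2 * (K : Int)) hn hm (by push_cast at h0; omega)
            (by omega)).mpr
          intro j hj0 hjn
          have e : i - 3 - 2 * (K : Int) + 1 + 2 * j = i - 2 * ((K : Int) + 1 - j) := by ring
          rw [e]
          exact hchain ((K : Int) + 1 - j) (by omega) (by push_cast; omega)
      rw [if_pos hfirst]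
      have : max (0 : Int) (((K + 1 : Nat) : Int) - n + 1) =
          max 0 ((K : Int) - n + 1) + 1 := by push_cast; omega
      rw [this]; ring
    · -- chain too short: no occurrence can start at the bottom either
      have hfirst : ¬ ((i - 3 - 2 * (K : Int)) < m - 2 * n ∧
          occB n m cs (i - 3 - 2 * (K : Int)) = true) := by
        rintro ⟨hr, ho⟩
        have hT := (occB_iff n m cs (i - 3 - 2 * (K : Int)) hn hm (by push_cast at h0; omega)
          (by omega)).mp ho ((K : Int) + 1) (by omega) (by omega)
        rw [show i - 3 - 2 * (K : Int) + 1 + 2 * ((K : Int) + 1) = i by ring] at hT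
        rcases hstop with hF | hB
        · rw [hF] at hT; exact absurd hT (by simp)
        · omega
      rw [if_neg hfirst]
      have : max (0 : Int) (((K + 1 : Nat) : Int) - n + 1) = 0 := by push_cast; omega
      rw [this]
      have : max (0 : Int) ((K : Int) - n + 1) = 0 := by omega
      rw [this]; ring

-- main invariant: A's loop from a chain of k triples ending before i computes B's count
lemma loopA_cnt (n m : Int) (cs : List Char) (hn : 1 ≤ n) (hm : m ≤ (cs.length : Int)) :
    ∀ (fuel : Nat) (i k cnt : Int), (m - 1 - i).toNat ≤ fuel → 1 ≤ i → 0 ≤ k →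
      0 ≤ i - 1 - 2 * k → i ≤ m →
      (∀ j : Int, 1 ≤ j → j ≤ k → Tb cs (i - 2 * j) = true) →
      ioioiLoop n m cs fuel i (min k (n - 1)) cnt =
        cnt - max 0 (k - n + 1) + cntFrom n m cs (i - 1 - 2 * k) := by
  intro fuel
  induction fuel with
  | zero =>
    intro i k cnt hf hi hk h0 him hchain
    show cnt = _
    have hw := window n m cs hn hm k.toNat i (by omega) him
      (by intro j hj1 hj2; exact hchain j hj1 (by omega)) (Or.inr (by omega))
    rw [show ((k.toNat : Int)) = k by omega] at hw
    rw [hw, cnt_zero n m cs i (by omega)]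
    omega
  | succ f ih =>
    intro i k cnt hf hi hk h0 him hchain
    show (if i < m - 1 then _ else cnt) = _
    by_cases hlt : i < m - 1
    · rw [if_pos hlt]
      rw [show (PySem.List.pyGet? cs (i - 1) == some 'I' &&
          PySem.List.pyGet? cs i == some 'O' &&
          PySem.List.pyGet? cs (i + 1) == some 'I') = Tb cs i from rfl]
      by_cases hT : Tb cs i = true
      · rw [hT]
        simp only [if_true]
        have hchain' : ∀ j : Int, 1 ≤ j → j ≤ k + 1 → Tb cs (i + 2 - 2 * j) = true := by
          intro j hj1 hj2
          by_cases hj : j = 1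
          · rw [hj, show i + 2 - 2 * 1 = i by ring]; exact hT
          · have := hchain (j - 1) (by omega) (by omega)
            rw [show i - 2 * (j - 1) = i + 2 - 2 * j by ring] at this
            exact this
        by_cases hge : n - 1 ≤ k
        · have hmin : min k (n - 1) = n - 1 := by omega
          rw [hmin, show n - 1 + 1 = n by ring]
          simp only [BEq.rfl, if_true]
          rw [show n - 1 = min (k + 1) (n - 1) by omega]
          have ihs := ih (i + 2) (k + 1) (cnt + 1) (by omega) (by omega) (by omega)
            (by omega) (by omega) hchain'
          rw [show i + 2 - 1 - 2 * (k + 1) = i - 1 - 2 * k by ring] at ihs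
          rw [ihs]
          omega
        · have hmin : min k (n - 1) = k := by omega
          rw [hmin]
          have heq : ((k + 1 : Int) == n) = false := by
            simp only [beq_eq_false_iff_ne]; omega
          rw [heq]
          simp only [Bool.false_eq_true, if_false]
          rw [show k + 1 = min (k + 1) (n - 1) by omega]
          have ihs := ih (i + 2) (k + 1) cnt (by omega) (by omega) (by omega)
            (by omega) (by omega) hchain'
          rw [show i + 2 - 1 - 2 * (k + 1) = i - 1 - 2 * k by ring] at ihs
          rw [ihs]
          omega
      · have hTf : Tb cs i = false := by simpa using hT
        rw [hTf]
        simp only [Bool.false_eq_true, if_false]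
        have ihs := ih (i + 1) 0 cnt (by omega) (by omega) (by omega) (by omega) (by omega)
          (by intro j hj1 hj2; omega)
        rw [show min (0 : Int) (n - 1) = 0 by omega,
            show i + 1 - 1 - 2 * 0 = i by ring] at ihs
        rw [ihs]
        have hw := window n m cs hn hm k.toNat i (by omega) him
          (by intro j hj1 hj2; exact hchain j hj1 (by omega)) (Or.inl hTf)
        rw [show ((k.toNat : Int)) = k by omega] at hw
        rw [hw]
        omega
    · rw [if_neg hlt]
      have hw := window n m cs hn hm k.toNat i (by omega) him
        (by intro j hj1 hj2; exact hchain j hj1 (by omega)) (Or.inr (by omega))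
      rw [show ((k.toNat : Int)) = k by omega] at hw
      rw [hw, cnt_zero n m cs i (by omega)]
      omega

-- B's foldl over range(0, m-2n) equals cntFrom
lemma foldl_cnt (n m : Int) (cs : List Char) :
    ∀ (fuel : Nat) (a c : Int), (m - 2 * n - a).toNat ≤ fuel →
      (PySem.List.pyRange a (m - 2 * n) 1).foldl
        (fun cnt p => if occB n m cs p then cnt + 1 else cnt) c = c + cntFrom n m cs a := by
  intro fuel
  induction fuel with
  | zero =>
    intro a c hf
    rw [cnt_zero n m cs a (by omega), PySem.List.pyRange_one,
        show (m - 2 * n - a).toNat = 0 by omega]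
    simp
  | succ f ih =>
    intro a c hf
    by_cases h : a < m - 2 * n
    · rw [PySem.List.pyRange_one_cons (by omega)]
      simp only [List.foldl_cons]
      rw [ih (a + 1) _ (by omega)]
      rw [cnt_peel n m cs a]
      by_cases ho : occB n m cs a = true
      · rw [if_pos ho, if_pos ⟨h, ho⟩]; ring
      · rw [if_neg (by simpa using ho), if_neg (by tauto)]; ring
    · rw [cnt_zero n m cs a (by omega), PySem.List.pyRange_one,
          show (m - 2 * n - a).toNat = 0 by omega]
      simp

-- ===== VERDICT (by name: the statement is the Claim_ definition above) =====
theorem ioioi_spec : Claim_equal_ioioi := by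
  intro n m s _hdom hpre
  unfold Spec_ioioi ioioi ioioi_alt
  by_cases hn : n < 1
  · rw [if_pos (by simp; omega)]
    exact ioioiLoop_nonpos n m s.toList (by omega) (m - 2).toNat 1 0 0 (by omega)
  · have hn1 : 1 ≤ n := by omega
    by_cases hm2 : m ≤ 2
    · rw [if_pos (by simp; omega), show (m - 2).toNat = 0 by omega]
      rfl
    · have hmlen : m ≤ (s.toList.length : Int) := by
        rcases hpre with h | h
        · rw [PySem.Str.len_eq] at h; exact h
        · omega
      have hA := loopA_cnt n m s.toList hn1 hmlen (m - 2).toNat 1 0 0 (by omega)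
        (by omega) (by omega) (by omega) (by omega) (by intro j hj1 hj2; omega)
      rw [show min (0 : Int) (n - 1) = 0 by omega] at hA
      rw [show (0 : Int) - max 0 (0 - n + 1) + cntFrom n m s.toList (1 - 1 - 2 * 0) =
          cntFrom n m s.toList 0 by
        rw [show (1 : Int) - 1 - 2 * 0 = 0 by ring]; omega] at hA
      rw [hA]
      by_cases hms : m < 2 * n + 1
      · rw [if_pos (by simp; omega), cnt_zero n m s.toList 0 (by omega)]
      · rw [if_neg (by simp; omega)]
        have hsl : PySem.List.slice s.toList none (some m) = s.toList.take m.toNat :=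
          PySem.List.slice_to s.toList (show (0 : Int) ≤ m by omega)
        have hlen : ((PySem.List.slice s.toList none (some m)).length : Int) = m := by
          rw [hsl, List.length_take]
          omega
        simp only []
        rw [hlen]
        have hfn : (fun (cnt p : Int) =>
            if PySem.List.slice (PySem.List.slice s.toList none (some m)) (some p)
                (some (p + 2 * n + 1)) ==
              ('I' :: (List.replicate n.toNat ('O' :: 'I' :: [])).flatten) then cnt + 1
            else cnt) =
            (fun (cnt p : Int) => if occB n m s.toList p then cnt + 1 else cnt) := rfl
        rw [hfn, foldl_cnt n m s.toList (m - 2 * n).toNat 0 0 (by omega)]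
        omega
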